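-- pv_equiv track=rewrite | github.com/mojisejr/exam-gen | api/app/services/ai_engine.py | calculate_batches
-- ===== SOURCE A (Python) =====
-- from typing import List, Optional, Set
--
-- def calculate_batches(total_count: int, max_batch: int = 10) -> List[int]:
--     """
--     Splits total_count into batch sizes capped by max_batch.
--
--     Args:
--         total_count: Total number of questions requested.
--         max_batch: Maximum number of questions per batch.
--
--     Returns:
--         A list of batch sizes (e.g., 50 -> [10, 10, 10, 10, 10]).
--
--     Raises:
--         ValueError: If total_count or max_batch is not positive.
--     """
--     if total_count <= 0:
--         raise ValueError("total_count must be positive")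
--     if max_batch <= 0:
--         raise ValueError("max_batch must be positive")
--
--     batches: List[int] = []
--     remaining = total_count
--     while remaining > 0:
--         batch_size = min(max_batch, remaining)
--         batches.append(batch_size)
--         remaining -= batch_size
--     return batches
-- ===== SOURCE B (Python) =====
-- def calculate_batches(total_count: int, max_batch: int = 10):
--     if total_count <= 0:
--         raise ValueError("total_count must be positive")
--     if max_batch <= 0:
--         raise ValueError("max_batch must be positive")
--     q, r = divmod(total_count, max_batch)
--     return [max_batch] * q + ([r] if r else [])
-- ===== Notes on version B (the rewrite author's own statement) =====
-- stated objective: idiomatic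
-- what changed: Replaced the while-loop accumulation with a closed-form divmod construction: [max_batch]*q plus the remainder if nonzero.
import Mathlib
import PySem

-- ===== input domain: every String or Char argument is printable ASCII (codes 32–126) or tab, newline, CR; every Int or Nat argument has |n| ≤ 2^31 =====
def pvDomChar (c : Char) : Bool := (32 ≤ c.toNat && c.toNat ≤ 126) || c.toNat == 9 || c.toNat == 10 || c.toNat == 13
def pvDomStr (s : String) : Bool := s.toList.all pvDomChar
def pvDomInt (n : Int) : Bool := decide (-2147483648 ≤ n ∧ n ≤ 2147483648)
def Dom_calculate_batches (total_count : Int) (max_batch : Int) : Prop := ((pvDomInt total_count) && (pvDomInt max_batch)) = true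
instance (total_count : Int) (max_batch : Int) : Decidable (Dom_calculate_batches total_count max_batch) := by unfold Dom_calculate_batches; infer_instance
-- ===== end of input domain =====

-- B replaces A's while-loop accumulation by a closed-form divmod construction (idiomatic).
-- Pre_ excludes exactly the inputs where A raises ValueError (non-positive total_count or max_batch).


-- ===== PORT A =====
-- the while-loop: fuel makes it total; inside Pre_ the fuel total_count.toNat suffices
def calcLoopA (max_batch : Int) (fuel : Nat) (remaining : Int) (batches : List Int) : List Int :=
  match fuel with
  | 0 => batches
  | f + 1 =>
    if remaining > 0 then
      let batch_size := min max_batch remaining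
      calcLoopA max_batch f (remaining - batch_size) (batches ++ [batch_size])
    else batches

def calculate_batches (total_count : Int) (max_batch : Int) : List Int :=
  if total_count ≤ 0 then []      -- raise ValueError (excluded by Pre_)
  else if max_batch ≤ 0 then []   -- raise ValueError (excluded by Pre_)
  else calcLoopA max_batch total_count.toNat total_count []

-- ===== PORT B =====
def calculate_batches_alt (total_count : Int) (max_batch : Int) : List Int :=
  if total_count ≤ 0 then []      -- raise ValueError (excluded by Pre_)
  else if max_batch ≤ 0 then []   -- raise ValueError (excluded by Pre_)
  else
    let q := PySem.Int.floordiv total_count max_batch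
    let r := PySem.Int.mod total_count max_batch
    List.replicate q.toNat max_batch ++ (if r ≠ 0 then [r] else [])

-- ===== PRECONDITION & SPEC =====
-- exactly the inputs on which A returns (it raises ValueError otherwise)
def Pre_calculate_batches (total_count : Int) (max_batch : Int) : Prop :=
  0 < total_count ∧ 0 < max_batch
instance (total_count : Int) (max_batch : Int) : Decidable (Pre_calculate_batches total_count max_batch) := by unfold Pre_calculate_batches; infer_instance
def pvWitness_calculate_batches : Int × Int := (7, 3)

def Spec_calculate_batches (total_count : Int) (max_batch : Int) (out : List Int) : Prop := out = calculate_batches_alt total_count max_batch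
instance (total_count : Int) (max_batch : Int) (out : List Int) : Decidable (Spec_calculate_batches total_count max_batch out) := by unfold Spec_calculate_batches; infer_instance

-- ===== CLAIM (what is proved, stated in full; the proofs are below) =====
def Claim_equal_calculate_batches : Prop := ∀ (total_count : Int) (max_batch : Int), Dom_calculate_batches total_count max_batch → Pre_calculate_batches total_count max_batch → Spec_calculate_batches total_count max_batch (calculate_batches total_count max_batch)

-- ===== LEMMAS AND PROOFS =====

-- loop invariant: with enough fuel, the loop appends the closed-form tail
theorem calcLoopA_closed (mb : Int) (hmb : 0 < mb) :
    ∀ (fuel : Nat) (r : Int) (acc : List Int), 0 ≤ r → r.toNat ≤ fuel →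
      calcLoopA mb fuel r acc =
        acc ++ List.replicate (r / mb).toNat mb ++ (if r % mb ≠ 0 then [r % mb] else []) := by
  intro fuel
  induction fuel with
  | zero =>
    intro r acc hr hf
    have : r = 0 := by omega
    subst this
    simp [calcLoopA]
  | succ f ih =>
    intro r acc hr hf
    by_cases hpos : r > 0
    · rw [calcLoopA, if_pos hpos]
      by_cases hle : r ≤ mb
      · -- last iteration: batch = r, remaining becomes 0
        have hmin : min mb r = r := by omega
        rw [hmin]
        simp only [sub_self]
        have h0 : calcLoopA mb f 0 (acc ++ [r]) = acc ++ [r] := by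
          cases f <;> simp [calcLoopA]
        rw [h0]
        rcases lt_or_eq_of_le hle with hlt | heq
        · have hdiv : r / mb = 0 := Int.ediv_eq_zero_of_lt hr hlt
          have hmod : r % mb = r := Int.emod_eq_of_lt hr hlt
          simp [hdiv, hmod, hpos.ne']
        · subst heq
          have hdiv : r / r = 1 := Int.ediv_self hpos.ne'
          have hmod : r % r = 0 := Int.emod_self
          simp [hdiv]
      · -- batch = mb, recurse on r - mb
        have hmin : min mb r = mb := by omega
        rw [hmin]
        have hrec := ih (r - mb) (acc ++ [mb]) (by omega) (by omega)
        rw [hrec]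
        have hdiv : (r - mb) / mb = r / mb - 1 := by
          have h := Int.add_mul_ediv_right (r - mb) 1 hmb.ne'
          simp only [one_mul, sub_add_cancel] at h
          omega
        have hmod : (r - mb) % mb = r % mb := by
          have h := Int.add_mul_emod_self_right (a := r - mb) (b := 1) (c := mb)
          simp only [one_mul, sub_add_cancel] at h
          exact h.symm
        have hq1 : 1 ≤ r / mb := by
          have := Int.le_ediv_iff_mul_le (a := 1) (b := r) hmb
          rw [this]; omega
        have hrepl : List.replicate (r / mb).toNat mb = mb :: List.replicate ((r / mb - 1).toNat) mb := by
          have : (r / mb).toNat = ((r / mb - 1).toNat) + 1 := by omega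
          rw [this, List.replicate_succ]
        rw [hdiv, hmod, hrepl]
        simp
    · rw [calcLoopA, if_neg hpos]
      have : r = 0 := by omega
      subst this
      simp

-- ===== VERDICT (by name: the statement is the Claim_ definition above) =====
theorem calculate_batches_spec : Claim_equal_calculate_batches := by
  intro t mb _ hpre
  obtain ⟨ht, hmb⟩ := hpre
  unfold Spec_calculate_batches calculate_batches calculate_batches_alt
  rw [if_neg (by omega), if_neg (by omega), if_neg (by omega), if_neg (by omega)]
  rw [calcLoopA_closed mb hmb t.toNat t [] (by omega) (by omega)]
  rw [PySem.Int.floordiv_eq_ediv_of_pos hmb, PySem.Int.mod_eq_emod_of_pos hmb]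
  simp
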